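-- pv_equiv track=rewrite | github.com/OpenSQZ/Jailbreak-Foundry | src/jbfoundry/attacks/generated/mousetrap_gen.py | _apply_vigenere
-- ===== SOURCE A (Python) =====
-- from typing import Dict, Any, Optional, List, Tuple
--
-- def _apply_vigenere(text: str) -> Tuple[str, str]:
--     """
--     Apply Vigenère cipher with key "MYSTERY".
--
--     Args:
--         text: Input text
--
--     Returns:
--         Tuple of (encrypted_text, decoding_instruction)
--     """
--     key = "MYSTERY"
--     result = []
--     key_index = 0
--
--     for char in text:
--         if char.isalpha():
--             # Get the shift from the key
--             key_char = key[key_index % len(key)]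
--             shift = ord(key_char.upper()) - ord('A')
--
--             # Encrypt the character
--             if char.isupper():
--                 encrypted = chr((ord(char) - ord('A') + shift) % 26 + ord('A'))
--             else:
--                 encrypted = chr((ord(char) - ord('a') + shift) % 26 + ord('a'))
--
--             result.append(encrypted)
--             key_index += 1
--         else:
--             result.append(char)
--
--     encrypted_text = ''.join(result)
--     instruction = "Decrypt the letters in the string using the Vigenère cipher with the key 'MYSTERY'. For each letter, shift it backward by the corresponding key letter's position in the alphabet (M=12, Y=24, S=18, T=19, E=4, R=17, Y=24). Keep all other characters unchanged."
--
--     return encrypted_text, instruction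
-- ===== SOURCE B (Python) =====
-- def _apply_vigenere(text: str):
--     """Two-pass Vigenere: extract letters, encrypt them as a batch, reinsert."""
--     shifts = [ord(k) - ord('A') for k in "MYSTERY"]
--     letters = [c for c in text if c.isalpha()]
--     enc = []
--     for i, c in enumerate(letters):
--         base = ord('A') if c.isupper() else ord('a')
--         enc.append(chr((ord(c) - base + shifts[i % len(shifts)]) % 26 + base))
--     it = iter(enc)
--     encrypted_text = ''.join(next(it) if c.isalpha() else c for c in text)
--     instruction = "Decrypt the letters in the string using the Vigen\u00e8re cipher with the key 'MYSTERY'. For each letter, shift it backward by the corresponding key letter's position in the alphabet (M=12, Y=24, S=18, T=19, E=4, R=17, Y=24). Keep all other characters unchanged."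
--     return encrypted_text, instruction
-- ===== Notes on version B (the rewrite author's own statement) =====
-- stated objective: alternative
-- what changed: Replaces A's single interleaved loop carrying a key_index state with a three-stage pipeline: filter out the letters, encrypt them as a standalone indexed batch against a precomputed shift table, then reinsert them into the original text by consuming an iterator.
import Mathlib
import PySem

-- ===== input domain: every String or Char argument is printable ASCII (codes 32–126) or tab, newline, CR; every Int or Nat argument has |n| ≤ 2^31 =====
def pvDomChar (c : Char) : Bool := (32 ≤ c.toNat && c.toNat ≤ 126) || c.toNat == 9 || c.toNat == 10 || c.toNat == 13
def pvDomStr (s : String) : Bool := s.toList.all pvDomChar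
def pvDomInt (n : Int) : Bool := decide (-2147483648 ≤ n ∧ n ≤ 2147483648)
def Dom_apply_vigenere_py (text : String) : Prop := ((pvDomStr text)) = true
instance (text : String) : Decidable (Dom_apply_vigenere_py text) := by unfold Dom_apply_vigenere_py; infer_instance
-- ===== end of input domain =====

-- B restructures A's single stateful loop into filter / batch-encrypt / reinsert; same return value (objective: alternative decomposition).

def pvInstruction : String := "Decrypt the letters in the string using the Vigenère cipher with the key 'MYSTERY'. For each letter, shift it backward by the corresponding key letter's position in the alphabet (M=12, Y=24, S=18, T=19, E=4, R=17, Y=24). Keep all other characters unchanged."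

-- ===== PORT A =====
-- key = "MYSTERY"; one pass over text with state (result, key_index)
def pvKeyA : List Char := "MYSTERY".toList

def pvEncA (c : Char) (ki : Nat) : Char :=
  let keyChar := pvKeyA.getD (ki % pvKeyA.length) 'A'
  let shift : Int := ((PySem.Chars.upperChar keyChar).toNat : Int) - 65
  if PySem.Chars.isupper c then
    Char.ofNat ((PySem.Int.mod (((c.toNat : Int) - 65) + shift) 26).toNat + 65)
  else
    Char.ofNat ((PySem.Int.mod (((c.toNat : Int) - 97) + shift) 26).toNat + 97)

def apply_vigenere_py (text : String) : String × String :=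
  let st := text.toList.foldl
    (fun (st : List Char × Nat) char =>
      if PySem.Chars.isalpha char then
        (st.1 ++ [pvEncA char st.2], st.2 + 1)
      else
        (st.1 ++ [char], st.2)) ([], 0)
  (String.ofList st.1, pvInstruction)

-- ===== PORT B =====
-- shifts table precomputed from the key
def pvShiftsB : List Int := "MYSTERY".toList.map (fun k => ((k.toNat : Int) - 65))

-- batch-encrypt the extracted letters, i = enumerate index
def pvEncLetters : List Char → Nat → List Char
  | [], _ => []
  | c :: rest, i =>
      let base : Int := if PySem.Chars.isupper c then 65 else 97
      let s := pvShiftsB.getD (i % pvShiftsB.length) 0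
      Char.ofNat ((PySem.Int.mod (((c.toNat : Int) - base) + s) 26).toNat + base.toNat)
        :: pvEncLetters rest (i + 1)

-- reinsert the encrypted letters at the alphabetic positions (next(it))
def pvReinsert : List Char → List Char → List Char
  | [], _ => []
  | c :: rest, enc =>
      if PySem.Chars.isalpha c then
        match enc with
        | e :: es => e :: pvReinsert rest es
        | [] => pvReinsert rest []
      else
        c :: pvReinsert rest enc

def apply_vigenere_py_alt (text : String) : String × String :=
  let letters := text.toList.filter PySem.Chars.isalpha
  let enc := pvEncLetters letters 0
  (String.ofList (pvReinsert text.toList enc), pvInstruction)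

-- ===== PRECONDITION & SPEC =====
def Spec_apply_vigenere_py (text : String) (out : String × String) : Prop := out = apply_vigenere_py_alt text
instance (text : String) (out : String × String) : Decidable (Spec_apply_vigenere_py text out) := by unfold Spec_apply_vigenere_py; infer_instance

-- ===== CLAIM (what is proved, stated in full; the proofs are below) =====
def Claim_equal_apply_vigenere_py : Prop := ∀ (text : String), Dom_apply_vigenere_py text → Spec_apply_vigenere_py text (apply_vigenere_py text)

-- ===== LEMMAS AND PROOFS =====

-- per-letter: A's on-the-fly encryption equals B's table-driven one
lemma enc_eq (c : Char) (ki : Nat) :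
    pvEncA c ki
      = (let base : Int := if PySem.Chars.isupper c then 65 else 97
         Char.ofNat ((PySem.Int.mod (((c.toNat : Int) - base) + pvShiftsB.getD (ki % pvShiftsB.length) 0) 26).toNat + base.toNat)) := by
  have h7 : ki % 7 < 7 := Nat.mod_lt ki (by norm_num)
  have hshift : pvShiftsB.getD (ki % pvShiftsB.length) 0
      = ((PySem.Chars.upperChar (pvKeyA.getD (ki % pvKeyA.length) 'A')).toNat : Int) - 65 := by
    have hlen : pvShiftsB.length = 7 := by decide
    have hlenA : pvKeyA.length = 7 := by decide
    rw [hlen, hlenA]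
    interval_cases h : (ki % 7) <;> decide
  simp only [pvEncA, hshift]
  by_cases hu : PySem.Chars.isupper c = true <;> simp [hu]

-- the loop invariant: A's fold with state (acc, ki) = acc ++ B's reinsertion
lemma loop_eq (cs : List Char) (acc : List Char) (ki : Nat) :
    (cs.foldl
      (fun (st : List Char × Nat) char =>
        if PySem.Chars.isalpha char then
          (st.1 ++ [pvEncA char st.2], st.2 + 1)
        else
          (st.1 ++ [char], st.2)) (acc, ki)).1
      = acc ++ pvReinsert cs (pvEncLetters (cs.filter PySem.Chars.isalpha) ki) := by
  induction cs generalizing acc ki with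
  | nil => simp [pvReinsert]
  | cons c rest ih =>
      by_cases ha : PySem.Chars.isalpha c = true
      · simp only [List.foldl_cons, List.filter_cons, ha, ite_true]
        rw [ih]
        simp [pvEncLetters, pvReinsert, ha, enc_eq]
      · simp only [List.foldl_cons, List.filter_cons, ha]
        rw [ih]
        simp [pvReinsert, ha]

-- ===== VERDICT (by name: the statement is the Claim_ definition above) =====
theorem apply_vigenere_py_spec : Claim_equal_apply_vigenere_py := by
  intro text _
  show _ = _
  simp only [apply_vigenere_py, apply_vigenere_py_alt]
  rw [loop_eq]
  simp
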